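-- pv_equiv track=rewrite | github.com/aware-network/aware-sdk | environments/aware_environments/kernel/objects/conversation/handlers.py | _split_message_segments
-- ===== SOURCE A (Python) =====
-- from typing import Iterable, List, Mapping, Optional, Sequence, Tuple, Set
--
-- def _split_message_segments(body: str) -> List[str]:
--     if not body.strip():
--         return []
--     segments: List[str] = []
--     current: List[str] = []
--     for line in body.splitlines():
--         if line.strip() == "---":
--             if current and any(part.strip() for part in current):
--                 segments.append("\n".join(current).strip("\n"))
--             current = []
--         else:
--             current.append(line)
--     if current and any(part.strip() for part in current):
--         segments.append("\n".join(current).strip("\n"))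
--     return segments
-- ===== SOURCE B (Python) =====
-- from typing import List
--
--
-- def _split_message_segments(body: str) -> List[str]:
--     if not body.strip():
--         return []
--     return _segments(body.splitlines())
--
--
-- def _segments(lines: List[str]) -> List[str]:
--     for i, line in enumerate(lines):
--         if line.strip() == "---":
--             head = lines[:i]
--             rest = _segments(lines[i + 1:])
--             if any(part.strip() for part in head):
--                 return ["\n".join(head).strip("\n")] + rest
--             return rest
--     if any(part.strip() for part in lines):
--         return ["\n".join(lines).strip("\n")]
--     return []
-- ===== Notes on version B (the rewrite author's own statement) =====
-- stated objective: alternative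
-- what changed: Replaces A's stateful buffer-accumulating loop with a final flush by a recursive helper that finds the first '---' delimiter line, emits the (non-blank) slice before it and recurses on the lines after it.
import Mathlib
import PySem

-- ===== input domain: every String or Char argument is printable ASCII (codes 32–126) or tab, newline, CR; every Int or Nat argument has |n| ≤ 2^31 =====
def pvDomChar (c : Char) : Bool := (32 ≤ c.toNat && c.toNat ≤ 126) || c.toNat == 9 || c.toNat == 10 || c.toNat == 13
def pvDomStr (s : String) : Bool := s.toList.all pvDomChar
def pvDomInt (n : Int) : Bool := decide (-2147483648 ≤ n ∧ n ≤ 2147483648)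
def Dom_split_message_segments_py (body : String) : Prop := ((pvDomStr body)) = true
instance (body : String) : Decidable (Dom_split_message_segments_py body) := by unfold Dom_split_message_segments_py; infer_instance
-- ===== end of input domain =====

-- B replaces A's stateful buffer-plus-final-flush loop by a recursive split at the first '---'
-- delimiter line (slice, emit, recurse on the remainder); objective: alternative decomposition.

-- ===== PORT A =====
def split_message_segments_py (body : String) : List String :=
  if PySem.Str.strip body = "" then []
  else
    let st := (PySem.Str.splitlines body).foldl
      (fun (acc : List String × List String) line =>
        if PySem.Str.strip line = "---" then
          if acc.2 ≠ [] ∧ acc.2.any (fun part => PySem.Str.strip part ≠ "") then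
            (acc.1 ++ [PySem.Str.stripChars (PySem.Str.join "\n" acc.2) "\n"], [])
          else
            (acc.1, [])
        else
          (acc.1, acc.2 ++ [line])) ([], [])
    if st.2 ≠ [] ∧ st.2.any (fun part => PySem.Str.strip part ≠ "") then
      st.1 ++ [PySem.Str.stripChars (PySem.Str.join "\n" st.2) "\n"]
    else
      st.1

-- ===== PORT B =====
-- Source B's _segments: find the first '---' line; head = lines before it, recurse on the lines
-- after it (takeWhile/dropWhile realise the lines[:i] / lines[i+1:] slices of the for-enumerate scan).
def segmentsB (lines : List String) : List String :=
  let head := lines.takeWhile (fun l => PySem.Str.strip l ≠ "---")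
  match h : lines.dropWhile (fun l => PySem.Str.strip l ≠ "---") with
  | [] =>
      if lines.any (fun part => PySem.Str.strip part ≠ "") then
        [PySem.Str.stripChars (PySem.Str.join "\n" lines) "\n"]
      else []
  | _ :: tl =>
      (if head.any (fun part => PySem.Str.strip part ≠ "") then
        [PySem.Str.stripChars (PySem.Str.join "\n" head) "\n"]
      else []) ++ segmentsB tl
  termination_by lines.length
  decreasing_by
    have hs := (List.dropWhile_suffix (l := lines)
      (p := fun l => decide (PySem.Str.strip l ≠ "---"))).length_le
    rw [h] at hs
    simp at hs ⊢
    omega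

def split_message_segments_py_alt (body : String) : List String :=
  if PySem.Str.strip body = "" then []
  else segmentsB (PySem.Str.splitlines body)

-- ===== PRECONDITION & SPEC =====
def Spec_split_message_segments_py (body : String) (out : List String) : Prop := out = split_message_segments_py_alt body
instance (body : String) (out : List String) : Decidable (Spec_split_message_segments_py body out) := by unfold Spec_split_message_segments_py; infer_instance

-- ===== CLAIM (what is proved, stated in full; the proofs are below) =====
def Claim_equal_split_message_segments_py : Prop := ∀ (body : String), Dom_split_message_segments_py body → Spec_split_message_segments_py body (split_message_segments_py body)

-- ===== LEMMAS AND PROOFS =====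

-- flush of a pending buffer (A's two identical emit sites; `cur ≠ [] ∧` is redundant since any [] = false)
def pvFlush (cur : List String) : List String :=
  if cur.any (fun part => PySem.Str.strip part ≠ "") then
    [PySem.Str.stripChars (PySem.Str.join "\n" cur) "\n"]
  else []

-- common recursive characterisation: segments of (cur ++ lines) with cur already buffered
def pvSegsP (cur : List String) (lines : List String) : List String :=
  match lines with
  | [] => pvFlush cur
  | l :: ls =>
      if PySem.Str.strip l = "---" then pvFlush cur ++ pvSegsP [] ls
      else pvSegsP (cur ++ [l]) ls

lemma flush_eq (cur : List String) :
    (if cur ≠ [] ∧ cur.any (fun part => PySem.Str.strip part ≠ "") then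
      [PySem.Str.stripChars (PySem.Str.join "\n" cur) "\n"] else []) = pvFlush cur := by
  unfold pvFlush
  cases cur <;> simp

lemma foldlA_eq (lines : List String) : ∀ segs cur,
    (let st := lines.foldl
      (fun (acc : List String × List String) line =>
        if PySem.Str.strip line = "---" then
          if acc.2 ≠ [] ∧ acc.2.any (fun part => PySem.Str.strip part ≠ "") then
            (acc.1 ++ [PySem.Str.stripChars (PySem.Str.join "\n" acc.2) "\n"], [])
          else
            (acc.1, [])
        else
          (acc.1, acc.2 ++ [line])) (segs, cur)
    if st.2 ≠ [] ∧ st.2.any (fun part => PySem.Str.strip part ≠ "") then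
      st.1 ++ [PySem.Str.stripChars (PySem.Str.join "\n" st.2) "\n"]
    else
      st.1) = segs ++ pvSegsP cur lines := by
  induction lines with
  | nil =>
      intro segs cur
      simp only [List.foldl_nil, pvSegsP]
      rw [← flush_eq cur]
      split <;> simp
  | cons l ls ih =>
      intro segs cur
      simp only [List.foldl_cons, pvSegsP]
      by_cases hd : PySem.Str.strip l = "---"
      · simp only [hd, if_true]
        rw [← flush_eq cur]
        split
        · rw [ih]; simp
        · rw [ih]; simp
      · simp only [if_neg hd]
        rw [ih]

lemma segmentsB_unfold (lines : List String) :
    segmentsB lines =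
      pvFlush (lines.takeWhile (fun l => PySem.Str.strip l ≠ "---")) ++
      (match lines.dropWhile (fun l => PySem.Str.strip l ≠ "---") with
        | [] => []
        | _ :: tl => segmentsB tl) := by
  cases h : lines.dropWhile (fun l => decide (PySem.Str.strip l ≠ "---")) with
  | nil =>
      have ht : lines.takeWhile (fun l => decide (PySem.Str.strip l ≠ "---")) = lines := by
        conv_rhs => rw [← List.takeWhile_append_dropWhile
          (p := fun l => decide (PySem.Str.strip l ≠ "---")) (l := lines)]
        rw [h, List.append_nil]
      rw [segmentsB]
      simp only [h, ht, List.append_nil, pvFlush]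
      split
      · rfl
      · next heq => rw [heq] at h; cases h
  | cons r tl =>
      rw [segmentsB]
      simp only [h, pvFlush]
      split
      · next heq => rw [heq] at h; cases h
      · next heq =>
          rw [h] at heq
          injection heq with h1 h2
          rw [h2]

lemma segsP_eq (lines : List String) : ∀ cur,
    pvSegsP cur lines =
      pvFlush (cur ++ lines.takeWhile (fun l => PySem.Str.strip l ≠ "---")) ++
      (match lines.dropWhile (fun l => PySem.Str.strip l ≠ "---") with
        | [] => []
        | _ :: tl => segmentsB tl) := by
  induction lines with
  | nil => intro cur; simp [pvSegsP]
  | cons l ls ih =>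
      intro cur
      by_cases hd : PySem.Str.strip l = "---"
      · have ht : List.takeWhile (fun l => decide (PySem.Str.strip l ≠ "---")) (l :: ls) = [] := by
          simp [hd]
        have hw : List.dropWhile (fun l => decide (PySem.Str.strip l ≠ "---")) (l :: ls) = l :: ls := by
          simp [hd]
        rw [pvSegsP, if_pos hd, ht, hw, List.append_nil, ih [], List.nil_append,
          ← segmentsB_unfold]
      · have ht : List.takeWhile (fun l => decide (PySem.Str.strip l ≠ "---")) (l :: ls) =
            l :: List.takeWhile (fun l => decide (PySem.Str.strip l ≠ "---")) ls := by
          simp [hd]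
        have hw : List.dropWhile (fun l => decide (PySem.Str.strip l ≠ "---")) (l :: ls) =
            List.dropWhile (fun l => decide (PySem.Str.strip l ≠ "---")) ls := by
          simp [hd]
        rw [pvSegsP, if_neg hd, ih (cur ++ [l]), ht, hw]
        simp

lemma segmentsB_eq_segsP (lines : List String) : segmentsB lines = pvSegsP [] lines := by
  rw [segsP_eq, List.nil_append, ← segmentsB_unfold]

-- ===== VERDICT (by name: the statement is the Claim_ definition above) =====
theorem split_message_segments_py_spec : Claim_equal_split_message_segments_py := by
  intro body _
  unfold Spec_split_message_segments_py split_message_segments_py split_message_segments_py_alt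
  by_cases hb : PySem.Str.strip body = ""
  · rw [if_pos hb, if_pos hb]
  · rw [if_neg hb, if_neg hb, foldlA_eq, segmentsB_eq_segsP, List.nil_append]
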